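-- pv_equiv track=rewrite | github.com/falseAzure/infineac | infineac/process_text.py | combine_adjacent_sentences
-- ===== SOURCE A (Python) =====
-- def combine_adjacent_sentences(
--     sentence_ids: list[int], sentences: list[str]
-- ) -> list[str]:
--     """Joins `sentences` that are adjacent based on their `sentence_ids`."""
--     joined_sentences = []
--     current_sentence = sentences[sentence_ids[0]]
--     for i in range(1, len(sentence_ids)):
--         if sentence_ids[i] == sentence_ids[i - 1] + 1:
--             current_sentence += " " + sentences[sentence_ids[i]]
--         else:
--             joined_sentences.append(current_sentence)
--             current_sentence = sentences[sentence_ids[i]]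
--
--     joined_sentences.append(current_sentence)
--     return joined_sentences
-- ===== SOURCE B (Python) =====
-- def combine_adjacent_sentences(
--     sentence_ids: list[int], sentences: list[str]
-- ) -> list[str]:
--     """Joins `sentences` that are adjacent based on their `sentence_ids`.
--
--     Group-then-join: first split `sentence_ids` into runs of consecutive ids,
--     then render each run with a single " ".join.
--     """
--     groups = []
--     current = []
--     prev = None
--     for sid in sentence_ids:
--         if current and sid != prev + 1:
--             groups.append(current)
--             current = []
--         current.append(sid)
--         prev = sid
--     if current:
--         groups.append(current)
--     return [" ".join(sentences[i] for i in g) for g in groups]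
-- ===== Notes on version B (the rewrite author's own statement) =====
-- stated objective: idiomatic
-- what changed: B splits the ids into runs of consecutive values first and then renders each run with a single ' '.join over the looked-up sentences, instead of A's single pass that grows a string accumulator with += and flushes it into the output list.
-- crash fix: On empty sentence_ids A raises IndexError (it unconditionally reads sentence_ids[0]) while B returns []. — e.g. on combine_adjacent_sentences([], ["ab"]): A raises IndexError, B returns []
import Mathlib
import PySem

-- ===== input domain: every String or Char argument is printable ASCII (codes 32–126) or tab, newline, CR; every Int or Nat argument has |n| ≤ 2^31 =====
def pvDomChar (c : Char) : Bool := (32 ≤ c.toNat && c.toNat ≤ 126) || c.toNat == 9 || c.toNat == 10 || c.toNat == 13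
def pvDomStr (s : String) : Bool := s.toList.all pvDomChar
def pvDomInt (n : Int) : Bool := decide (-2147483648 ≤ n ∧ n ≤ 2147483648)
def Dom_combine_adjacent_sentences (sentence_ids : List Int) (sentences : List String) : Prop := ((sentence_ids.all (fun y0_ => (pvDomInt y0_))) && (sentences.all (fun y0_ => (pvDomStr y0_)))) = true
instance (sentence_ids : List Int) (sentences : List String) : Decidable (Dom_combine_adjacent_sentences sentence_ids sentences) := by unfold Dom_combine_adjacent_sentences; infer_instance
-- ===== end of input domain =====

-- B groups consecutive-id runs first and joins each run with " ".join (idiomatic decomposition);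
-- A grows a string accumulator in one indexed pass. Proved equal on nonempty, in-range sentence_ids.


-- ===== PORT A =====
-- sentences[i] (Python indexing; in range under Pre_, so the default "" is never used there)
def pvGetSent (sentences : List String) (i : Int) : String :=
  (PySem.List.pyGet? sentences i).getD ""

def combine_adjacent_sentences (sentence_ids : List Int) (sentences : List String) : List String :=
  -- current_sentence = sentences[sentence_ids[0]]
  let current0 := pvGetSent sentences ((PySem.List.pyGet? sentence_ids 0).getD 0)
  -- for i in range(1, len(sentence_ids)): …
  let st := (PySem.List.pyRange 1 (sentence_ids.length : Int)).foldl
    (fun (st : List String × String) i =>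
      if (PySem.List.pyGet? sentence_ids i).getD 0 = (PySem.List.pyGet? sentence_ids (i - 1)).getD 0 + 1 then
        (st.1, st.2 ++ " " ++ pvGetSent sentences ((PySem.List.pyGet? sentence_ids i).getD 0))
      else
        (st.1 ++ [st.2], pvGetSent sentences ((PySem.List.pyGet? sentence_ids i).getD 0)))
    ([], current0)
  st.1 ++ [st.2]

-- ===== PORT B =====
-- the for-loop of Source B: state (groups, current, prev); prev starts as a junk value,
-- it is only read when current ≠ [] (Source B's 'if current and …' guard)
def pvStepB (st : List (List Int) × List Int × Int) (sid : Int) : List (List Int) × List Int × Int :=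
  if st.2.1 ≠ [] ∧ sid ≠ st.2.2 + 1 then
    (st.1 ++ [st.2.1], [sid], sid)
  else
    (st.1, st.2.1 ++ [sid], sid)

-- " ".join(sentences[i] for i in g)
def pvJoinRun (sentences : List String) (g : List Int) : String :=
  PySem.Str.join " " (g.map (pvGetSent sentences))

def combine_adjacent_sentences_alt (sentence_ids : List Int) (sentences : List String) : List String :=
  let st := sentence_ids.foldl pvStepB ([], [], 0)
  let groups := if st.2.1 ≠ [] then st.1 ++ [st.2.1] else st.1
  groups.map (pvJoinRun sentences)

-- ===== PRECONDITION & SPEC =====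
-- Pre_ excludes exactly the inputs where Python A raises IndexError:
-- empty sentence_ids, or an id outside Python's index range of sentences.
def Pre_combine_adjacent_sentences (sentence_ids : List Int) (sentences : List String) : Prop :=
  sentence_ids ≠ [] ∧ ∀ i ∈ sentence_ids, PySem.Raise.InRange sentences.length i
instance (sentence_ids : List Int) (sentences : List String) : Decidable (Pre_combine_adjacent_sentences sentence_ids sentences) := by unfold Pre_combine_adjacent_sentences; infer_instance

def pvWitness_combine_adjacent_sentences : List Int × List String := ([0, 1, 0], ["ab", "cd"])

-- On empty sentence_ids A raises IndexError (it unconditionally reads sentence_ids[0]) while B returns [].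
def Raises_combine_adjacent_sentences (sentence_ids : List Int) (sentences : List String) : Prop :=
  sentence_ids = []
instance (sentence_ids : List Int) (sentences : List String) : Decidable (Raises_combine_adjacent_sentences sentence_ids sentences) := by unfold Raises_combine_adjacent_sentences; infer_instance
def pvRaiseWitness_combine_adjacent_sentences : List Int × List String := ([], ["ab"])
def pvRaiseWitnessOut_combine_adjacent_sentences : List String := []

def Spec_combine_adjacent_sentences (sentence_ids : List Int) (sentences : List String) (out : List String) : Prop := out = combine_adjacent_sentences_alt sentence_ids sentences
instance (sentence_ids : List Int) (sentences : List String) (out : List String) : Decidable (Spec_combine_adjacent_sentences sentence_ids sentences out) := by unfold Spec_combine_adjacent_sentences; infer_instance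

-- ===== CLAIM (what is proved, stated in full; the proofs are below) =====
def Claim_equal_combine_adjacent_sentences : Prop := ∀ (sentence_ids : List Int) (sentences : List String), Dom_combine_adjacent_sentences sentence_ids sentences → Pre_combine_adjacent_sentences sentence_ids sentences → Spec_combine_adjacent_sentences sentence_ids sentences (combine_adjacent_sentences sentence_ids sentences)
def Claim_raises_combine_adjacent_sentences : Prop := (∀ (sentence_ids : List Int) (sentences : List String), Dom_combine_adjacent_sentences sentence_ids sentences → Raises_combine_adjacent_sentences sentence_ids sentences → ¬ Pre_combine_adjacent_sentences sentence_ids sentences) ∧ (Dom_combine_adjacent_sentences (pvRaiseWitness_combine_adjacent_sentences.1) (pvRaiseWitness_combine_adjacent_sentences.2) ∧ Raises_combine_adjacent_sentences (pvRaiseWitness_combine_adjacent_sentences.1) (pvRaiseWitness_combine_adjacent_sentences.2) ∧ combine_adjacent_sentences_alt (pvRaiseWitness_combine_adjacent_sentences.1) (pvRaiseWitness_combine_adjacent_sentences.2) = pvRaiseWitnessOut_combine_adjacent_sentences)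

-- ===== LEMMAS AND PROOFS =====

-- the runs of consecutive ids in (x :: xs): reference grouping both ports are reduced to
def pvRuns (x : Int) (xs : List Int) : List (List Int) :=
  match xs with
  | [] => [[x]]
  | y :: ys =>
    match pvRuns y ys with
    | [] => [[x]]
    | g :: gs => if y = x + 1 then (x :: g) :: gs else [x] :: g :: gs

theorem pvRuns_head (x : Int) (xs : List Int) :
    ∃ g gs, pvRuns x xs = (x :: g) :: gs := by
  cases xs with
  | nil => exact ⟨[], [], rfl⟩
  | cons y ys =>
    obtain ⟨g, gs, h⟩ := pvRuns_head y ys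
    by_cases hy : y = x + 1
    · subst hy; exact ⟨(x + 1) :: g, gs, by simp [pvRuns, h]⟩
    · exact ⟨[], (y :: g) :: gs, by simp [pvRuns, h, hy]⟩

-- string-side: " ".join (a :: l) is the left fold of ' ++ " " ++ ·' over l starting from a
theorem pvJoin_cons (a : String) (l : List String) :
    PySem.Str.join " " (a :: l) = l.foldl (fun acc s => acc ++ " " ++ s) a := by
  induction l generalizing a with
  | nil =>
    apply String.toList_inj.mp
    simp [PySem.Str.toList_join, PySem.Chars.join_singleton]
  | cons b bs ih =>
    have h1 : PySem.Str.join " " (a :: b :: bs) = a ++ " " ++ PySem.Str.join " " (b :: bs) := by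
      apply String.toList_inj.mp
      simp [PySem.Str.toList_join, PySem.Chars.join_cons_cons]
    rw [h1, ih b, List.foldl_cons]
    -- pull the prefix through the fold
    clear h1 ih
    induction bs generalizing a b with
    | nil => rfl
    | cons c cs ih2 =>
      simp only [List.foldl_cons]
      rw [ih2]
      congr 1
      apply String.toList_inj.mp
      simp

-- A-side loop, structurally
def pvLoopA (sentences : List String) (prev : Int) (rest : List Int) (st : List String × String) : List String :=
  match rest with
  | [] => st.1 ++ [st.2]
  | y :: ys =>
    if y = prev + 1 then pvLoopA sentences y ys (st.1, st.2 ++ " " ++ pvGetSent sentences y)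
    else pvLoopA sentences y ys (st.1 ++ [st.2], pvGetSent sentences y)

theorem pvFoldA_eq_loopA (sentences : List String) (pre : List Int) (prev : Int)
    (rest : List Int) (st : List String × String) :
    (let r := (PySem.List.pyRange ((pre.length : Int) + 1) (((pre ++ prev :: rest).length : Int))).foldl
      (fun (st : List String × String) i =>
        if (PySem.List.pyGet? (pre ++ prev :: rest) i).getD 0 = (PySem.List.pyGet? (pre ++ prev :: rest) (i - 1)).getD 0 + 1 then
          (st.1, st.2 ++ " " ++ pvGetSent sentences ((PySem.List.pyGet? (pre ++ prev :: rest) i).getD 0))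
        else
          (st.1 ++ [st.2], pvGetSent sentences ((PySem.List.pyGet? (pre ++ prev :: rest) i).getD 0)))
      st
     r.1 ++ [r.2]) = pvLoopA sentences prev rest st := by
  induction rest generalizing pre prev st with
  | nil =>
    rw [PySem.List.pyRange_one_eq_nil (by simp)]
    rfl
  | cons y ys ih =>
    have hlen : ((pre.length : Int) + 1) < (((pre ++ prev :: y :: ys).length : Int)) := by
      push_cast [List.length_append, List.length_cons]; omega
    rw [PySem.List.pyRange_one_cons hlen]
    have hy : PySem.List.pyGet? (pre ++ prev :: y :: ys) ((pre.length : Int) + 1) = some y := by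
      have : (pre.length : Int) + 1 = (((pre ++ [prev]).length : Int)) := by simp
      rw [this, show pre ++ prev :: y :: ys = (pre ++ [prev]) ++ y :: ys by simp]
      exact PySem.List.pyGet?_append_length _ _ _
    have hp : PySem.List.pyGet? (pre ++ prev :: y :: ys) ((pre.length : Int) + 1 - 1) = some prev := by
      have : (pre.length : Int) + 1 - 1 = (pre.length : Int) := by ring
      rw [this]
      exact PySem.List.pyGet?_append_length _ _ _
    simp only [List.foldl_cons, hy, hp, Option.getD_some]
    have heq : pre ++ prev :: y :: ys = (pre ++ [prev]) ++ y :: ys := by simp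
    have hcast : (pre.length : Int) + 1 + 1 = (((pre ++ [prev]).length : Int)) + 1 := by simp
    by_cases hc : y = prev + 1
    · rw [if_pos hc, heq, hcast, ih]
      rw [pvLoopA, if_pos hc]
    · rw [if_neg hc, heq, hcast, ih]
      rw [pvLoopA, if_neg hc]

-- pvLoopA computes: flush the groups, joining the first group's remainder onto st.2
theorem pvLoopA_eq_runs (sentences : List String) (prev : Int) (rest : List Int)
    (joined : List String) (cur : String) :
    pvLoopA sentences prev rest (joined, cur) =
      joined ++ (match pvRuns prev rest with
        | [] => []
        | g :: gs => (g.tail.foldl (fun acc i => acc ++ " " ++ pvGetSent sentences i) cur)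
            :: gs.map (pvJoinRun sentences)) := by
  induction rest generalizing prev joined cur with
  | nil => simp [pvLoopA, pvRuns]
  | cons y ys ih =>
    obtain ⟨g, gs, h⟩ := pvRuns_head y ys
    by_cases hc : y = prev + 1
    · subst hc
      rw [pvLoopA, if_pos rfl, ih, h]
      simp only [pvRuns, h]
      simp [List.foldl_cons]
    · rw [pvLoopA, if_neg hc, ih, h]
      simp only [pvRuns, h, if_neg hc]
      have hjoin : pvJoinRun sentences (y :: g) =
          g.foldl (fun acc i => acc ++ " " ++ pvGetSent sentences i) (pvGetSent sentences y) := by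
        rw [pvJoinRun, List.map_cons, pvJoin_cons, List.foldl_map]
      simp [hjoin]

-- B-side fold with a nonempty current run
theorem pvFoldB_eq_runs (rest : List Int) (prev : Int)
    (groups : List (List Int)) (cur : List Int) (hcur : cur ≠ []) :
    (let st := rest.foldl pvStepB (groups, cur, prev)
     (if st.2.1 ≠ [] then st.1 ++ [st.2.1] else st.1)) =
      groups ++ (match pvRuns prev rest with
        | [] => []
        | g :: gs => (cur ++ g.tail) :: gs) := by
  induction rest generalizing prev groups cur with
  | nil => simp [pvRuns, hcur]
  | cons y ys ih =>
    obtain ⟨g, gs, h⟩ := pvRuns_head y ys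
    by_cases hc : y = prev + 1
    · subst hc
      have hstep : pvStepB (groups, cur, prev) (prev + 1) = (groups, cur ++ [prev + 1], prev + 1) := by
        simp [pvStepB]
      rw [List.foldl_cons, hstep, ih _ _ _ (by simp)]
      simp only [pvRuns, h]
      simp
    · have hstep : pvStepB (groups, cur, prev) y = (groups ++ [cur], [y], y) := by
        simp [pvStepB, hcur, hc]
      rw [List.foldl_cons, hstep, ih _ _ _ (by simp)]
      simp only [pvRuns, h, if_neg hc]
      simp

-- the two ports against the reference grouping
theorem pvA_eq (sentences : List String) (x : Int) (xs : List Int) :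
    combine_adjacent_sentences (x :: xs) sentences =
      (match pvRuns x xs with
        | [] => []
        | g :: gs => (g.tail.foldl (fun acc i => acc ++ " " ++ pvGetSent sentences i) (pvGetSent sentences x))
            :: gs.map (pvJoinRun sentences)) := by
  have h0 : (PySem.List.pyGet? (x :: xs) 0).getD 0 = x := by
    rw [PySem.List.pyGet?_zero_cons]; rfl
  have := pvFoldA_eq_loopA sentences [] x xs ([], pvGetSent sentences x)
  simp only [List.nil_append, List.length_nil, Nat.cast_zero, zero_add] at this
  rw [combine_adjacent_sentences, h0, this, pvLoopA_eq_runs, List.nil_append]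

theorem pvB_eq (sentences : List String) (x : Int) (xs : List Int) :
    combine_adjacent_sentences_alt (x :: xs) sentences =
      (pvRuns x xs).map (pvJoinRun sentences) := by
  have hstep : pvStepB ([], [], 0) x = ([], [x], x) := by simp [pvStepB]
  have := pvFoldB_eq_runs xs x [] [x] (by simp)
  obtain ⟨g, gs, h⟩ := pvRuns_head x xs
  rw [combine_adjacent_sentences_alt, List.foldl_cons, hstep, this, h]
  simp

-- ===== VERDICT (by name: the statement is the Claim_ definition above) =====
theorem combine_adjacent_sentences_spec : Claim_equal_combine_adjacent_sentences := by
  intro ids sents _ hpre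
  unfold Spec_combine_adjacent_sentences
  obtain ⟨hne, -⟩ := hpre
  obtain ⟨x, xs, rfl⟩ := List.exists_cons_of_ne_nil hne
  obtain ⟨g, gs, hruns⟩ := pvRuns_head x xs
  rw [pvA_eq, pvB_eq, hruns]
  simp only [List.map_cons, List.tail_cons]
  congr 1
  rw [pvJoinRun, List.map_cons, pvJoin_cons, List.foldl_map]

theorem combine_adjacent_sentences_raises : Claim_raises_combine_adjacent_sentences := by
  unfold Claim_raises_combine_adjacent_sentences
  exact ⟨fun ids sents _ hr hp => hp.1 hr, by decide⟩

-- the crash-fix fact at the witness, restated with literal arguments (extracted from the raises theorem)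
theorem pvRaiseWitness_ok : combine_adjacent_sentences_alt [] ["ab"] = ([] : List String) :=
  combine_adjacent_sentences_raises.2.2.2
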